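-- pv_equiv track=rewrite | github.com/Bazulenkov/algorithms | Sprint13/Final_tasks/3a.py | cap_data
-- ===== SOURCE A (Python) =====
-- def cap_data(capacity):
--     if len(capacity) < 2:
--         return 0
--
--     count = 0
--     capacity.sort()
--     while capacity[-2] != 0:
--         capacity[-2] -= 1
--         capacity[-1] -= 1
--         count += 1
--         capacity.sort()
--     return count
-- ===== SOURCE B (Python) =====
-- def cap_data(capacity):
--     if len(capacity) < 2:
--         return 0
--     piles = [x for x in capacity if x >= 0]
--     total = sum(piles)
--     biggest = max(piles, default=0)
--     return min(total // 2, total - biggest)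
-- ===== Notes on version B (the rewrite author's own statement) =====
-- stated objective: faster
-- what changed: A simulates every pair-decrement operation, re-sorting the list after each step; B computes the answer in one pass by the closed form min(total // 2, total - max) over the nonnegative piles.
-- outside the precondition, e.g. on cap_data([-3, 5]): A does not finish within the time limit, B returns 0
import Mathlib
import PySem

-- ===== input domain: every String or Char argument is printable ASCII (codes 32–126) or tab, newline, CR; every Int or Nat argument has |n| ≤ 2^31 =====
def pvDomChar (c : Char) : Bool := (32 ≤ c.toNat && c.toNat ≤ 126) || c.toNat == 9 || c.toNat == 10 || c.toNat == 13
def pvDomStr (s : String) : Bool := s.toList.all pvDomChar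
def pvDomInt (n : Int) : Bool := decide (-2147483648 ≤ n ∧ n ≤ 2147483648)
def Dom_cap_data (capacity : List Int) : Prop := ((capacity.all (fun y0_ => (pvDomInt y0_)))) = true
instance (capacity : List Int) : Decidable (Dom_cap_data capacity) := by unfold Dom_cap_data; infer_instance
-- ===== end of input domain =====

-- B replaces A's simulate-every-operation loop (re-sorting after each decrement step) by the closed
-- form min(total // 2, total - max) over the nonnegative piles, computed in one pass.
-- NOTE: A sorts its argument list in place (an observable mutation); B does not mutate —
-- the equivalence claimed here is about the return value only.

-- ===== PORT A =====
-- one loop iteration's state change: capacity[-2] -= 1; capacity[-1] -= 1; capacity.sort()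
-- (the two negative-index assignments are ported by hand as take + append, exact for lists of
-- length ≥ 2, which the loop maintains)
def capStep (xs : List Int) : List Int :=
  let a := (PySem.List.pyGet? xs (-2)).getD 0
  let b := (PySem.List.pyGet? xs (-1)).getD 0
  PySem.List.sorted (xs.take (xs.length - 2) ++ [a - 1, b - 1]) (fun x => x)

-- the while loop; the fuel only makes the recursion total — it is never exhausted on inputs
-- satisfying Pre_ (proved by capLoop_eq below)
def capLoop : Nat → List Int → Int → Int
  | 0, _, count => count
  | fuel + 1, xs, count =>
    if (PySem.List.pyGet? xs (-2)).getD 0 ≠ 0 then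
      capLoop fuel (capStep xs) (count + 1)
    else count

def cap_data (capacity : List Int) : Int :=
  if capacity.length < 2 then 0
  else capLoop ((capacity.map Int.toNat).sum + 1) (PySem.List.sorted capacity (fun x => x)) 0

-- ===== PORT B =====
def cap_data_alt (capacity : List Int) : Int :=
  if capacity.length < 2 then 0
  else
    let piles := capacity.filter (fun x => 0 ≤ x)
    let total := piles.sum
    let biggest := PySem.List.maxD piles (fun x => x) 0
    min (PySem.Int.floordiv total 2) (total - biggest)

-- ===== PRECONDITION & SPEC =====
-- Pre_ excludes exactly the inputs on which A never returns: with ≥ 2 elements but fewer than 2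
-- nonnegative ones, the second-largest pile is negative and A's while loop decrements it forever.
def Pre_cap_data (capacity : List Int) : Prop :=
  capacity.length < 2 ∨ 2 ≤ (capacity.filter (fun x => 0 ≤ x)).length
instance (capacity : List Int) : Decidable (Pre_cap_data capacity) := by
  unfold Pre_cap_data; infer_instance

def pvWitness_cap_data : List Int := [3, 1, 2]

def Spec_cap_data (capacity : List Int) (out : Int) : Prop := out = cap_data_alt capacity
instance (capacity : List Int) (out : Int) : Decidable (Spec_cap_data capacity out) := by
  unfold Spec_cap_data; infer_instance

-- ===== CLAIM (what is proved, stated in full; the proofs are below) =====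
def Claim_equal_cap_data : Prop := ∀ (capacity : List Int), Dom_cap_data capacity → Pre_cap_data capacity → Spec_cap_data capacity (cap_data capacity)

-- ===== LEMMAS AND PROOFS =====

-- sum of the nonnegative elements
def psum (xs : List Int) : Int := (xs.filter (fun x => 0 ≤ x)).sum

-- the value the remaining loop will add to count: min(S // 2, S - max)
def phi (xs : List Int) : Int :=
  min (PySem.Int.floordiv (psum xs) 2) (psum xs - (xs.getLast?).getD 0)

lemma getLastD_max {l : List Int} (hp : l.Pairwise (· ≤ ·)) :
    ∀ x ∈ l, x ≤ l.getLast?.getD 0 := by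
  induction l with
  | nil => simp
  | cons y t ih =>
    rcases List.pairwise_cons.mp hp with ⟨hy, hpt⟩
    intro x hx
    cases t with
    | nil => simp at hx ⊢; omega
    | cons z u =>
      simp only [List.getLast?_cons_cons]
      rcases List.mem_cons.mp hx with rfl | hx'
      · exact le_trans (hy z (by simp)) (ih hpt z (by simp))
      · exact ih hpt x hx'

lemma getLastD_mem {l : List Int} (h : l ≠ []) : l.getLast?.getD 0 ∈ l := by
  induction l with
  | nil => simp at h
  | cons y t ih =>
    cases t with
    | nil => simp
    | cons z u =>
      simp only [List.getLast?_cons_cons]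
      exact List.mem_cons_of_mem y (ih (by simp))

lemma second_nonneg {ys : List Int} {a b : Int}
    (hp : (ys ++ [a, b]).Pairwise (· ≤ ·))
    (hc : 2 ≤ ((ys ++ [a, b]).filter (fun x => 0 ≤ x)).length) : 0 ≤ a := by
  by_contra hneg
  rcases List.pairwise_append.mp hp with ⟨_, _, hcross⟩
  have hys : ys.filter (fun x => 0 ≤ x) = [] := by
    rw [List.filter_eq_nil_iff]
    intro x hx
    have := hcross x hx a (by simp)
    simp; omega
  rw [List.filter_append, hys] at hc
  simp [show ¬ (0 ≤ a) by omega] at hc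
  by_cases hb : 0 ≤ b <;> simp [hb] at hc

lemma phi_exit {ys : List Int} {b : Int}
    (hp : (ys ++ [(0:Int), b]).Pairwise (· ≤ ·)) : phi (ys ++ [0, b]) = 0 := by
  rcases List.pairwise_append.mp hp with ⟨_, hab, hcross⟩
  have hb : (0:Int) ≤ b := by
    have := List.pairwise_cons.mp hab
    exact this.1 b (by simp)
  have hys : (ys.filter (fun x => 0 ≤ x)).sum = 0 := by
    apply List.sum_eq_zero
    intro x hx
    rcases List.mem_filter.mp hx with ⟨hmem, hnn⟩
    have h1 := hcross x hmem 0 (by simp)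
    have h2 := of_decide_eq_true hnn
    omega
  have hpsum : psum (ys ++ [0, b]) = b := by
    simp [psum, List.filter_append, hys, hb]
  have hlast : (ys ++ [(0:Int), b]).getLast?.getD 0 = b := by simp
  rw [phi, hpsum, hlast, PySem.Int.floordiv_eq_ediv_of_pos (by norm_num)]
  simp [min_def]
  omega

lemma pyGet_neg2 (ys : List Int) (a b : Int) :
    PySem.List.pyGet? (ys ++ [a, b]) (-2) = some a := by
  simp [PySem.List.pyGet?, PySem.List.pyIdx?]

lemma pyGet_neg1 (ys : List Int) (a b : Int) :
    PySem.List.pyGet? (ys ++ [a, b]) (-1) = some b := by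
  simp [PySem.List.pyGet?, PySem.List.pyIdx?]

lemma capStep_eq (ys : List Int) (a b : Int) :
    capStep (ys ++ [a, b]) = PySem.List.sorted (ys ++ [a - 1, b - 1]) (fun x => x) := by
  rw [capStep, pyGet_neg2, pyGet_neg1]
  have : (ys ++ [a, b]).length - 2 = ys.length := by simp
  rw [this]
  have : (ys ++ [a, b]).take ys.length = ys := by
    rw [List.take_append_of_le_length (by simp)]
    simp
  rw [this]
  rfl

lemma step_invariant {ys : List Int} {a b : Int}
    (hp : (ys ++ [a, b]).Pairwise (· ≤ ·)) (ha : 0 < a) :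
    (capStep (ys ++ [a, b])).Pairwise (· ≤ ·) ∧
    2 ≤ ((capStep (ys ++ [a, b])).filter (fun x => 0 ≤ x)).length ∧
    phi (capStep (ys ++ [a, b])) = phi (ys ++ [a, b]) - 1 := by
  rcases List.pairwise_append.mp hp with ⟨hpy, hab, hcross⟩
  have hab' : a ≤ b := (List.pairwise_cons.mp hab).1 b (by simp)
  have hya : ∀ x ∈ ys, x ≤ a := fun x hx => hcross x hx a (by simp)
  rw [capStep_eq]
  set zs := PySem.List.sorted (ys ++ [a - 1, b - 1]) (fun x => x) with hzs
  have hperm : zs.Perm (ys ++ [a - 1, b - 1]) := PySem.List.sorted_perm _ _ _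
  have hpw : zs.Pairwise (· ≤ ·) := by
    have := PySem.List.sorted_pairwise (ys ++ [a - 1, b - 1]) (fun x => x)
    simpa using this
  have hfnew : List.filter (fun x => decide (0 ≤ x)) [a - 1, b - 1] = [a - 1, b - 1] := by
    simp only [List.filter_cons, List.filter_nil]
    rw [if_pos (by simp only [decide_eq_true_eq]; omega),
       if_pos (by simp only [decide_eq_true_eq]; omega)]
  have hfold : List.filter (fun x => decide (0 ≤ x)) [a, b] = [a, b] := by
    simp only [List.filter_cons, List.filter_nil]
    rw [if_pos (by simp only [decide_eq_true_eq]; omega),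
       if_pos (by simp only [decide_eq_true_eq]; omega)]
  refine ⟨hpw, ?_, ?_⟩
  · rw [(hperm.filter _).length_eq, List.filter_append]
    simp [hfnew]
  · -- psum of zs
    have hps : psum zs = psum (ys ++ [a, b]) - 2 := by
      simp only [psum]
      rw [(hperm.filter _).sum_eq]
      simp only [List.filter_append, hfnew, hfold, List.sum_append, List.sum_cons,
        List.sum_nil]
      ring
    -- last of zs
    have hzne : zs ≠ [] := by
      intro h
      have := hperm.length_eq
      simp [h] at this
    set M := zs.getLast?.getD 0 with hM
    have hMmem : M ∈ ys ++ [a - 1, b - 1] := hperm.mem_iff.mp (getLastD_mem hzne)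
    have hMub : ∀ x ∈ zs, x ≤ M := getLastD_max hpw
    have hMb1 : b - 1 ≤ M := hMub (b - 1) (hperm.mem_iff.mpr (by simp))
    have hMleb : M ≤ b := by
      rcases List.mem_append.mp hMmem with h | h
      · exact le_trans (hya M h) hab'
      · simp at h; omega
    -- psum of the old list
    have hpsold : psum (ys ++ [a, b]) = psum ys + a + b := by
      simp only [psum, List.filter_append, hfold, List.sum_append, List.sum_cons,
        List.sum_nil]
      ring
    have hlastold : (ys ++ [a, b]).getLast?.getD 0 = b := by simp
    rcases (show M = b - 1 ∨ M = b by omega) with hMe | hMe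
    · -- the maximum dropped by one
      rw [phi, phi, hps, hpsold, ← hM, hMe, hlastold,
        PySem.Int.floordiv_eq_ediv_of_pos (by norm_num),
        PySem.Int.floordiv_eq_ediv_of_pos (by norm_num)]
      rw [min_def, min_def]
      split_ifs <;> omega
    · -- maximum unchanged: b occurs a third time, so psum ≥ 3b
      have hbys : b ∈ ys := by
        rcases List.mem_append.mp hMmem with h | h
        · rwa [hMe] at h
        · simp at h; omega
      have hba : b = a := le_antisymm (hya b hbys) hab'
      have hpyb : b ≤ psum ys := by
        apply List.single_le_sum
        · intro x hx
          exact of_decide_eq_true (List.mem_filter.mp hx).2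
        · exact List.mem_filter.mpr ⟨hbys, by simp; omega⟩
      rw [phi, phi, hps, hpsold, ← hM, hMe, hlastold,
        PySem.Int.floordiv_eq_ediv_of_pos (by norm_num),
        PySem.Int.floordiv_eq_ediv_of_pos (by norm_num)]
      rw [min_def, min_def]
      split_ifs <;> omega

lemma exists_two_last {xs : List Int} (h : 2 ≤ xs.length) :
    ∃ ys a b, xs = ys ++ [a, b] := by
  match hr : xs.reverse with
  | [] => simp [List.reverse_eq_nil_iff] at hr; simp [hr] at h
  | [x] => have := congrArg List.reverse hr; simp at this; simp [this] at h
  | b :: a :: t =>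
    refine ⟨t.reverse, a, b, ?_⟩
    have := congrArg List.reverse hr
    simpa using this

lemma psum_nonneg (xs : List Int) : 0 ≤ psum xs := by
  apply List.sum_nonneg
  intro x hx
  exact of_decide_eq_true (List.mem_filter.mp hx).2

lemma phi_nonneg {xs : List Int}
    (hp : xs.Pairwise (· ≤ ·)) (hc : 2 ≤ (xs.filter (fun x => 0 ≤ x)).length) :
    0 ≤ phi xs := by
  have hlen : 2 ≤ xs.length := le_trans hc (List.length_filter_le _ _)
  obtain ⟨ys, a, b, rfl⟩ := exists_two_last hlen
  have ha : 0 ≤ a := second_nonneg hp hc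
  rcases List.pairwise_append.mp hp with ⟨_, hab, hcross⟩
  have hab' : a ≤ b := (List.pairwise_cons.mp hab).1 b (by simp)
  have hfold : List.filter (fun x => decide (0 ≤ x)) [a, b] = [a, b] := by
    simp only [List.filter_cons, List.filter_nil]
    rw [if_pos (by simp only [decide_eq_true_eq]; omega),
       if_pos (by simp only [decide_eq_true_eq]; omega)]
  have hpsold : psum (ys ++ [a, b]) = psum ys + a + b := by
    simp only [psum, List.filter_append, hfold, List.sum_append, List.sum_cons,
      List.sum_nil]
    ring
  have hlast : (ys ++ [a, b]).getLast?.getD 0 = b := by simp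
  have hys := psum_nonneg ys
  rw [phi, hpsold, hlast, PySem.Int.floordiv_eq_ediv_of_pos (by norm_num)]
  rw [le_min_iff]
  omega

lemma capLoop_eq (fuel : Nat) : ∀ (xs : List Int) (count : Int),
    xs.Pairwise (· ≤ ·) → 2 ≤ (xs.filter (fun x => 0 ≤ x)).length →
    (phi xs).toNat ≤ fuel → capLoop fuel xs count = count + phi xs := by
  induction fuel with
  | zero =>
    intro xs count hp hc hf
    have h0 := phi_nonneg hp hc
    have : phi xs = 0 := by omega
    simp [capLoop, this]
  | succ fuel ih =>
    intro xs count hp hc hf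
    have hlen : 2 ≤ xs.length := le_trans hc (List.length_filter_le _ _)
    obtain ⟨ys, a, b, rfl⟩ := exists_two_last hlen
    have ha : 0 ≤ a := second_nonneg hp hc
    by_cases hz : a = 0
    · subst hz
      rw [capLoop, pyGet_neg2]
      simp [phi_exit hp]
    · have ha' : 0 < a := by omega
      obtain ⟨hp', hc', hphi⟩ := step_invariant hp ha'
      rw [capLoop, pyGet_neg2]
      simp only [Option.getD_some, if_pos hz]
      have h0' := phi_nonneg hp' hc'
      rw [ih _ _ hp' hc' (by omega), hphi]
      ring

lemma psum_le_toNat_sum (xs : List Int) : psum xs ≤ ((xs.map Int.toNat).sum : Int) := by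
  induction xs with
  | nil => simp [psum]
  | cons x t ih =>
    simp only [psum, List.filter_cons, List.map_cons, List.sum_cons] at *
    by_cases h : 0 ≤ x
    · simp only [decide_eq_true h, if_true, List.sum_cons]
      push_cast at ih ⊢
      omega
    · simp only [decide_eq_false h]
      push_cast at ih ⊢
      omega

lemma alt_eq_phi (capacity : List Int) (hlen : 2 ≤ capacity.length)
    (hc : 2 ≤ (capacity.filter (fun x => 0 ≤ x)).length) :
    cap_data_alt capacity = phi (PySem.List.sorted capacity (fun x => x)) := by
  set sx := PySem.List.sorted capacity (fun x => x) with hsx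
  have hperm : sx.Perm capacity := PySem.List.sorted_perm _ _ _
  have hpw : sx.Pairwise (· ≤ ·) := by
    have := PySem.List.sorted_pairwise capacity (fun x => x)
    simpa using this
  have hsne : sx ≠ [] := by
    intro h
    have := hperm.length_eq
    rw [h] at this
    simp at this
    omega
  set L := sx.getLast?.getD 0 with hL
  have hLmem : L ∈ capacity := hperm.mem_iff.mp (getLastD_mem hsne)
  have hLub : ∀ x ∈ capacity, x ≤ L := fun x hx => getLastD_max hpw x (hperm.mem_iff.mpr hx)
  set piles := capacity.filter (fun x => 0 ≤ x) with hpiles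
  have hpne : piles ≠ [] := by
    intro h
    rw [h] at hc
    simp at hc
  have hmax : ∃ m, PySem.List.max? piles (fun x => x) = some m := by
    cases hm : PySem.List.max? piles (fun x => x) with
    | none => exact absurd ((PySem.List.max?_eq_none_iff piles (fun x => x)).mp hm) hpne
    | some m => exact ⟨m, rfl⟩
  obtain ⟨m, hm⟩ := hmax
  have hmmem : m ∈ piles := PySem.List.max?_mem hm
  have hmub : ∀ y ∈ piles, y ≤ m := by
    intro y hy
    simpa using PySem.List.max?_isMax hm y hy
  have hL0 : 0 ≤ L := by
    have hm0 : 0 ≤ m := of_decide_eq_true (List.mem_filter.mp hmmem).2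
    have := hLub m (List.mem_filter.mp hmmem).1
    omega
  have hLm : L = m := by
    have h1 : L ≤ m := hmub L (List.mem_filter.mpr ⟨hLmem, by simpa using hL0⟩)
    have h2 : m ≤ L := hLub m (List.mem_filter.mp hmmem).1
    omega
  have hps2 : psum sx = piles.sum := by
    rw [psum, (hperm.filter _).sum_eq]
  rw [cap_data_alt, if_neg (by omega)]
  simp only [← hpiles, PySem.List.maxD, hm, Option.getD_some]
  rw [phi, hps2, ← hL, hLm]

-- ===== VERDICT (by name: the statement is the Claim_ definition above) =====
theorem cap_data_spec : Claim_equal_cap_data := by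
  intro capacity _ hpre
  unfold Spec_cap_data
  by_cases hlen : capacity.length < 2
  · rw [cap_data, if_pos hlen, cap_data_alt, if_pos hlen]
  · have hlen' : 2 ≤ capacity.length := by omega
    have hc : 2 ≤ (capacity.filter (fun x => 0 ≤ x)).length := by
      rcases hpre with h | h
      · omega
      · exact h
    set sx := PySem.List.sorted capacity (fun x => x) with hsx
    have hperm : sx.Perm capacity := PySem.List.sorted_perm _ _ _
    have hpw : sx.Pairwise (· ≤ ·) := by
      have := PySem.List.sorted_pairwise capacity (fun x => x)
      simpa using this
    have hcs : 2 ≤ (sx.filter (fun x => 0 ≤ x)).length := by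
      rw [(hperm.filter _).length_eq]
      exact hc
    have hfuel : (phi sx).toNat ≤ (capacity.map Int.toNat).sum + 1 := by
      have h1 : psum sx = psum capacity := (hperm.filter _).sum_eq
      have h2 := psum_le_toNat_sum capacity
      have h3 : phi sx ≤ PySem.Int.floordiv (psum sx) 2 := min_le_left _ _
      have h4 : PySem.Int.floordiv (psum sx) 2 ≤ psum sx := by
        rw [PySem.Int.floordiv_eq_ediv_of_pos (by norm_num)]
        have := psum_nonneg sx
        omega
      omega
    rw [cap_data, if_neg hlen, capLoop_eq _ _ _ hpw hcs hfuel, alt_eq_phi capacity hlen' hc]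
    ring
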